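-- pv_equiv track=rewrite | github.com/mcxraider/Sentiment-Analysis-with-BERT | 1010spe.py | num_plays
-- ===== SOURCE A (Python) =====
-- def num_plays(pos, board):
--     if pos < 1:
--         return 0
--     elif pos >= board[0]:
--           return 1
--     else:
--         if (pos in board[2]):
--             # player is on top of a chute
--             return 0
--         elif (pos in board[1]):
--             # player is at the bottom of a ladder
--             pos = board[1][pos]
--         res = 0
--         for moves in range(1, 7):
--             res += num_plays(pos + moves, board)
--         return res
-- ===== SOURCE B (Python) =====
-- def num_plays(pos, board):
--     n = board[0]
--     if pos < 1:
--         return 0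
--     if pos >= n:
--         return 1
--     table = {}
--
--     def val(q):
--         return 1 if q >= n else table.get(q, 0)
--
--     for p in range(n - 1, pos - 1, -1):
--         if p in board[2]:
--             table[p] = 0
--         else:
--             start = board[1][p] if p in board[1] else p
--             table[p] = sum(val(start + m) for m in range(1, 7))
--     return table[pos]
-- ===== Notes on version B (the rewrite author's own statement) =====
-- stated objective: alternative
-- what changed: Replaces the 6-way branching recursion with a single bottom-up dynamic-programming pass that fills a table of play counts from square n-1 down to pos and reads off the answer.
-- outside the precondition, e.g. on num_plays(7, (8, {7: 0, 1: 20, 2: 20, 3: 20, 4: 20, 5: 20, 6: 20}, set())): A returns 36, B returns 0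
import Mathlib
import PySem

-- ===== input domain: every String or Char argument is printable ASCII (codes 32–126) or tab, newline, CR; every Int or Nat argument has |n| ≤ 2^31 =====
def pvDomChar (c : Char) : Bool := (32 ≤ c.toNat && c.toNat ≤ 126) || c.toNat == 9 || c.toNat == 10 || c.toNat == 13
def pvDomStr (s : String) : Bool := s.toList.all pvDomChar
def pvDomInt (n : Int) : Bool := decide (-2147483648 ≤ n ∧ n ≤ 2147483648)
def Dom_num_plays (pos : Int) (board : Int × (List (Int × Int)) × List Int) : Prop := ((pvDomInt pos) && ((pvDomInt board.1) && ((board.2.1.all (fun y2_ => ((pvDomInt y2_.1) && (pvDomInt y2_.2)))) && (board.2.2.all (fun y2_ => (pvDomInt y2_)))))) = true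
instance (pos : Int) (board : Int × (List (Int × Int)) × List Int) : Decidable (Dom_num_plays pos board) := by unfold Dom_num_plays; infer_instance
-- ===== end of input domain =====

-- B replaces A's 6-way branching recursion by one bottom-up DP pass over the squares from n-1 down to pos.

-- ===== PORT A =====
-- Literal port of A's recursion; the fuel only makes it total (on Pre_, (board.1 - pos).toNat + 1 steps
-- always suffice, since every recursive call strictly increases pos within the fuel budget).
def numPlaysFuel (fuel : Nat) (pos : Int) (board : Int × (List (Int × Int)) × List Int) : Int :=
  match fuel with
  | 0 => 0
  | fuel + 1 =>
    if pos < 1 then 0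
    else if pos ≥ board.1 then 1
    else if board.2.2.contains pos then 0
    else
      -- 'pos in board[1]' then 'pos = board[1][pos]' fused: get? is some exactly on membership
      let pos' := match (PySem.Dict.ofList board.2.1).get? pos with
        | some v => v
        | none => pos
      (PySem.List.pyRange 1 7 1).foldl (fun res moves => res + numPlaysFuel fuel (pos' + moves) board) 0

def num_plays (pos : Int) (board : Int × (List (Int × Int)) × List Int) : Int :=
  numPlaysFuel ((board.1 - pos).toNat + 1) pos board

-- ===== PORT B =====
-- body of Source B's 'for p in range(n-1, 0, -1)' loop
def stepB (board : Int × (List (Int × Int)) × List Int) (table : PySem.Dict Int Int) (p : Int) : PySem.Dict Int Int :=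
  if board.2.2.contains p then table.insert p 0
  else
    let start := match (PySem.Dict.ofList board.2.1).get? p with
      | some v => v
      | none => p
    table.insert p ((PySem.List.pyRange 1 7 1).foldl
      (fun acc m => acc + (if start + m ≥ board.1 then (1 : Int) else table.getD (start + m) 0)) 0)

def num_plays_alt (pos : Int) (board : Int × (List (Int × Int)) × List Int) : Int :=
  let n := board.1
  if pos < 1 then 0
  else if pos ≥ n then 1
  else
    let table := (PySem.List.pyRange (n - 1) (pos - 1) (-1)).foldl (stepB board) PySem.Dict.empty
    table.getD pos 0   -- table[pos]: the key is always present here (1 ≤ pos < n)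

-- ===== PRECONDITION & SPEC =====
-- Pre_ excludes boards with an effective downward ladder reachable from pos (a ladder pair whose key
-- is a live, non-chute square at or above pos and whose value is below the key): there A's recursion
-- generically never terminates (RecursionError), and in the rare acyclic such boards where A does
-- return, B's bottom-up fill order is invalid and does not match.
def Pre_num_plays (pos : Int) (board : Int × (List (Int × Int)) × List Int) : Prop :=
  ∀ p ∈ board.2.1, pos ≤ p.1 → 1 ≤ p.1 → p.1 < board.1 → p.1 ∉ board.2.2 → p.1 ≤ p.2

instance (pos : Int) (board : Int × (List (Int × Int)) × List Int) : Decidable (Pre_num_plays pos board) := by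
  unfold Pre_num_plays; infer_instance

def pvWitness_num_plays : Int × (Int × (List (Int × Int)) × List Int) := (1, (5, [(2, 4)], [3]))

def Spec_num_plays (pos : Int) (board : Int × (List (Int × Int)) × List Int) (out : Int) : Prop := out = num_plays_alt pos board
instance (pos : Int) (board : Int × (List (Int × Int)) × List Int) (out : Int) : Decidable (Spec_num_plays pos board out) := by unfold Spec_num_plays; infer_instance

-- ===== CLAIM (what is proved, stated in full; the proofs are below) =====
def Claim_equal_num_plays : Prop := ∀ (pos : Int) (board : Int × (List (Int × Int)) × List Int), Dom_num_plays pos board → Pre_num_plays pos board → Spec_num_plays pos board (num_plays pos board)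

-- ===== LEMMAS AND PROOFS =====

theorem pv_update_mem (l : List (Int × Int)) (d : PySem.Dict Int Int) (p v : Int)
    (h : (d.update l).get? p = some v) : (p, v) ∈ d.items ∨ (p, v) ∈ l := by
  induction l generalizing d with
  | nil => left; exact PySem.Dict.mem_items_of_get?_eq_some _ h
  | cons x xs ih =>
    rcases ih (d.insert x.1 x.2) h with h' | h'
    · rcases (PySem.Dict.mem_items_insert _ _ _ _).1 h' with h'' | h''
      · right; simp [h'']
      · left; exact h''.1
    · right; right; exact h'

theorem pv_ofList_mem (l : List (Int × Int)) (p v : Int)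
    (h : (PySem.Dict.ofList l).get? p = some v) : (p, v) ∈ l := by
  rcases pv_update_mem l PySem.Dict.empty p v h with h' | h'
  · simp [PySem.Dict.empty] at h'
  · exact h'

-- the redirected position after the ladder lookup (shared shape of both ports)
def pvJump (board : Int × (List (Int × Int)) × List Int) (p : Int) : Int :=
  match (PySem.Dict.ofList board.2.1).get? p with
  | some v => v
  | none => p

theorem pvJump_ge (board : Int × (List (Int × Int)) × List Int) (lo p : Int)
    (hpre : Pre_num_plays lo board) (h0 : lo ≤ p) (h1 : 1 ≤ p) (h2 : p < board.1)
    (h3 : ¬ board.2.2.contains p) : p ≤ pvJump board p := by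
  unfold pvJump
  cases hg : (PySem.Dict.ofList board.2.1).get? p with
  | none => exact le_refl p
  | some v =>
    exact hpre (p, v) (pv_ofList_mem _ _ _ hg) h0 h1 h2 (by simpa using h3)

-- canonical value: A's recursion with just enough fuel
def pvNP (board : Int × (List (Int × Int)) × List Int) (q : Int) : Int :=
  numPlaysFuel ((board.1 - q).toNat + 1) q board

theorem pv_fuel_stable (board : Int × (List (Int × Int)) × List Int) (lo : Int)
    (hpre : Pre_num_plays lo board) :
    ∀ fuel q, lo ≤ q → (board.1 - q).toNat + 1 ≤ fuel → numPlaysFuel fuel q board = pvNP board q := by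
  intro fuel
  induction fuel using Nat.strong_induction_on with
  | _ fuel ih =>
  intro q hlo hfuel
  obtain ⟨f, rfl⟩ : ∃ f, fuel = f + 1 := ⟨fuel - 1, by omega⟩
  unfold pvNP
  by_cases hq1 : q < 1
  · simp [numPlaysFuel, hq1]
  by_cases hq2 : q ≥ board.1
  · simp [numPlaysFuel, hq1, hq2]
  by_cases hq3 : board.2.2.contains q
  · have hmem : q ∈ board.2.2 := by simpa using hq3
    simp [numPlaysFuel, hq1, hq2, hmem]
  · have hj : q ≤ pvJump board q := pvJump_ge board lo q hpre hlo (by omega) (by omega) hq3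
    have hmem : q ∉ board.2.2 := by simpa using hq3
    simp only [numPlaysFuel, hq1, hq2, if_false]
    rw [if_neg (by simpa using hq3), if_neg (by simpa using hq3)]
    apply PySem.List.foldl_congr_mem
    intro acc m hm
    have hm' : 1 ≤ m ∧ m < 7 := (PySem.List.mem_pyRange_one).1 hm
    have hb : (board.1 - (pvJump board q + m)).toNat + 1 ≤ (board.1 - q).toNat := by omega
    rw [show (match (PySem.Dict.ofList board.2.1).get? q with
        | some v => v | none => q) = pvJump board q from rfl]
    rw [ih f (by omega) (pvJump board q + m) (by omega) (by omega),
        ih (board.1 - q).toNat (by omega) (pvJump board q + m) (by omega) hb]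

def pvInv (board : Int × (List (Int × Int)) × List Int) (t : PySem.Dict Int Int) (p : Int) : Prop :=
  ∀ q, t.get? q = if p < q ∧ q < board.1 then some (pvNP board q) else none

theorem pv_step (board : Int × (List (Int × Int)) × List Int) (lo : Int)
    (hpre : Pre_num_plays lo board) (t : PySem.Dict Int Int) (p : Int)
    (h0 : lo ≤ p) (h1 : 1 ≤ p) (h2 : p < board.1) (hinv : pvInv board t p) :
    pvInv board (stepB board t p) (p - 1) := by
  intro q
  unfold stepB
  by_cases hc : board.2.2.contains p
  · rw [if_pos hc, PySem.Dict.get?_insert]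
    by_cases hqp : q = p
    · subst hqp
      rw [if_pos rfl, if_pos (by omega)]
      have hmem : q ∈ board.2.2 := by simpa using hc
      simp [pvNP, numPlaysFuel, show ¬ q < 1 by omega, show ¬ q ≥ board.1 by omega, hmem]
    · rw [if_neg hqp, hinv q]
      by_cases hcond : p < q ∧ q < board.1
      · rw [if_pos hcond, if_pos (by omega)]
      · rw [if_neg hcond, if_neg (by omega)]
  · rw [if_neg hc, PySem.Dict.get?_insert]
    by_cases hqp : q = p
    · subst hqp
      rw [if_pos rfl, if_pos (by omega)]
      congr 1
      have hj : q ≤ pvJump board q := pvJump_ge board lo q hpre h0 h1 h2 hc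
      have hmem : q ∉ board.2.2 := by simpa using hc
      rw [show (match (PySem.Dict.ofList board.2.1).get? q with
          | some v => v | none => q) = pvJump board q from rfl]
      unfold pvNP
      simp only [numPlaysFuel, show ¬ q < 1 by omega, show ¬ q ≥ board.1 by omega, if_false]
      rw [if_neg (by simpa using hc)]
      rw [show (match (PySem.Dict.ofList board.2.1).get? q with
          | some v => v | none => q) = pvJump board q from rfl]
      apply PySem.List.foldl_congr_mem
      intro acc m hm
      have hm' : 1 ≤ m ∧ m < 7 := (PySem.List.mem_pyRange_one).1 hm
      congr 1
      by_cases hge : pvJump board q + m ≥ board.1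
      · rw [if_pos hge]
        obtain ⟨k, hk⟩ : ∃ k, (board.1 - q).toNat = k + 1 := ⟨(board.1 - q).toNat - 1, by omega⟩
        rw [hk]
        simp [numPlaysFuel, show ¬ pvJump board q + m < 1 by omega, hge]
      · rw [if_neg hge]
        rw [PySem.Dict.getD_eq_get?_getD, hinv (pvJump board q + m),
            if_pos (by constructor <;> omega)]
        exact (pv_fuel_stable board lo hpre (board.1 - q).toNat (pvJump board q + m) (by omega) (by omega)).symm
    · rw [if_neg hqp, hinv q]
      by_cases hcond : p < q ∧ q < board.1
      · rw [if_pos hcond, if_pos (by omega)]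
      · rw [if_neg hcond, if_neg (by omega)]

theorem pv_loop (board : Int × (List (Int × Int)) × List Int) (lo : Int)
    (hpre : Pre_num_plays (lo + 1) board) (hlo : 0 ≤ lo) :
    ∀ (k : Nat) (t : PySem.Dict Int Int), lo + (k : Int) < board.1 → pvInv board t (lo + (k : Int)) →
      pvInv board ((PySem.List.pyRange (lo + (k : Int)) lo (-1)).foldl (stepB board) t) lo := by
  intro k
  induction k with
  | zero =>
    intro t hk hinv
    rw [PySem.List.pyRange_neg_one_eq_nil (by omega)]
    simpa using hinv
  | succ k ih =>
    intro t hk hinv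
    have hcast : lo + ((k + 1 : Nat) : Int) = lo + (k : Int) + 1 := by push_cast; ring
    rw [hcast] at hk hinv ⊢
    rw [PySem.List.pyRange_neg_one_cons (by omega), List.foldl_cons]
    have hstep := pv_step board (lo + 1) hpre t (lo + (k : Int) + 1) (by omega) (by omega) hk hinv
    rw [show (lo + (k : Int) + 1 - 1) = lo + (k : Int) by ring] at hstep ⊢
    exact ih (stepB board t (lo + (k : Int) + 1)) (by omega) hstep

-- ===== VERDICT (by name: the statement is the Claim_ definition above) =====
theorem num_plays_spec : Claim_equal_num_plays := by
  intro pos board _dom hpre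
  unfold Spec_num_plays num_plays num_plays_alt
  by_cases h1 : pos < 1
  · simp [numPlaysFuel, h1]
  by_cases h2 : pos ≥ board.1
  · simp [numPlaysFuel, h1, h2]
  · have hpre' : Pre_num_plays (pos - 1 + 1) board :=
      fun p hp hlo h1' h2' h3' => hpre p hp (by omega) h1' h2' h3'
    obtain ⟨k, hk⟩ : ∃ k : Nat, (pos - 1) + (k : Int) = board.1 - 1 := ⟨(board.1 - pos).toNat, by omega⟩
    have hinv0 : pvInv board PySem.Dict.empty ((pos - 1) + (k : Int)) := by
      intro q
      rw [PySem.Dict.get?_empty, if_neg (by omega)]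
    have hget := pv_loop board (pos - 1) hpre' (by omega) k PySem.Dict.empty (by omega) hinv0 pos
    rw [if_pos (by omega)] at hget
    rw [if_neg h1, if_neg h2]
    show pvNP board pos = (List.foldl (stepB board) PySem.Dict.empty
        (PySem.List.pyRange (board.1 - 1) (pos - 1) (-1))).getD pos 0
    rw [← hk, PySem.Dict.getD_eq_get?_getD, hget]
    rfl
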